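-- pv_equiv track=rewrite | github.com/DanGOTO100/AutomaticLyricsGenerationAI | AutomaticLyricsGeneration.py | readlyrics
-- ===== SOURCE A (Python) =====
-- def readlyrics(lyfile):
--     finallist = []
--     linesraw = lyfile.split("\n")
--     for tline in linesraw:
--         words = tline.split(" ")
--         finallist.append(words)
--     flatlist = [y for x in finallist for y in x]
--     return(flatlist)
-- ===== SOURCE B (Python) =====
-- def readlyrics(lyfile):
--     return lyfile.replace("\n", " ").split(" ")
-- ===== Notes on version B (the rewrite author's own statement) =====
-- stated objective: simpler
-- what changed: Replaces the two-level split (split on newline, split each line on space, collect lists, flatten with a comprehension) by normalizing newlines to spaces once and splitting the whole string a single time, with no intermediate list of lists.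
import Mathlib
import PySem

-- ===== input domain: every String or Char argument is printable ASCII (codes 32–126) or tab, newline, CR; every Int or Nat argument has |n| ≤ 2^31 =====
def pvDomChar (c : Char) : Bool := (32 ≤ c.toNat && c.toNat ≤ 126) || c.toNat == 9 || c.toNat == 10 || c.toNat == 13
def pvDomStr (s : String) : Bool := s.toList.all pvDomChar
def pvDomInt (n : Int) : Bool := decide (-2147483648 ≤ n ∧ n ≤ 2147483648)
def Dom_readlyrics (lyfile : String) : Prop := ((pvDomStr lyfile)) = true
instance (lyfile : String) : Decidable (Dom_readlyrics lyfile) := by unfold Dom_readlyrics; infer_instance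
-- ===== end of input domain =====

-- B replaces A's split-per-line-then-flatten by normalizing newlines to spaces and splitting once (simpler decomposition, same O(n) cost).

-- ===== PORT A =====
-- split("\n") / split(" ") have nonempty separators, so split? is always `some`; getD [] only discharges the Option.
def readlyrics (lyfile : String) : List String :=
  let linesraw := (PySem.Str.split? lyfile "\n").getD []
  let finallist := linesraw.foldl (fun acc tline => acc ++ [(PySem.Str.split? tline " ").getD []]) []
  finallist.flatMap (fun x => x)

-- ===== PORT B =====
def readlyrics_alt (lyfile : String) : List String :=
  (PySem.Str.split? (PySem.Str.replace lyfile "\n" " ") " ").getD []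

-- ===== PRECONDITION & SPEC =====
def Spec_readlyrics (lyfile : String) (out : List String) : Prop := out = readlyrics_alt lyfile
instance (lyfile : String) (out : List String) : Decidable (Spec_readlyrics lyfile out) := by unfold Spec_readlyrics; infer_instance

-- ===== CLAIM (what is proved, stated in full; the proofs are below) =====
def Claim_equal_readlyrics : Prop := ∀ (lyfile : String), Dom_readlyrics lyfile → Spec_readlyrics lyfile (readlyrics lyfile)

-- ===== LEMMAS AND PROOFS =====

/-- Reference single-character splitter used only inside the proofs. -/
def pvSplit (c : Char) : List Char → List (List Char)
  | [] => [[]]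
  | x :: t => if x = c then [] :: pvSplit c t else (pvSplit c t).modifyHead (x :: ·)

theorem pvSplit_ne_nil (c : Char) (l : List Char) : pvSplit c l ≠ [] := by
  induction l with
  | nil => simp [pvSplit]
  | cons x t ih =>
    simp only [pvSplit]
    split
    · simp
    · cases hs : pvSplit c t with
      | nil => exact absurd hs ih
      | cons a u => simp [List.modifyHead]

theorem pvModifyHead_append {α : Type} (f : α → α) (l m : List α) (h : l ≠ []) :
    (l ++ m).modifyHead f = l.modifyHead f ++ m := by
  cases l with
  | nil => exact absurd rfl h
  | cons a t => simp [List.modifyHead]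

theorem pvModifyHead_modifyHead {α : Type} (f g : α → α) (l : List α) :
    (l.modifyHead g).modifyHead f = l.modifyHead (fun x => f (g x)) := by
  cases l <;> simp [List.modifyHead]

/-- `Chars.splitOn.go` with a single-character separator computes `pvSplit`. -/
theorem pvSplitOn_go_eq (c : Char) :
    ∀ (l : List Char) (fuel : Nat) (cur : List Char) (acc : List (List Char)),
      l.length < fuel →
      PySem.Chars.splitOn.go [c] fuel l cur acc
        = acc.reverse ++ (pvSplit c l).modifyHead (cur.reverse ++ ·) := by
  intro l
  induction l with
  | nil =>
    intro fuel cur acc h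
    match fuel, h with
    | fuel + 1, _ => simp [PySem.Chars.splitOn.go, pvSplit, List.modifyHead]
  | cons x t ih =>
    intro fuel cur acc h
    match fuel, h with
    | fuel + 1, h =>
      have hf : t.length < fuel := by simpa using h
      by_cases hx : x = c
      · subst hx
        have hpre : List.isPrefixOf [x] (x :: t) = true := by
          simp [List.isPrefixOf]
        rw [PySem.Chars.splitOn.go]
        simp only [hpre, List.drop_succ_cons, List.drop_zero, List.length_singleton]
        rw [ih fuel [] (cur.reverse :: acc) hf]
        have : (pvSplit x t).modifyHead (fun y => [].reverse ++ y) = pvSplit x t := by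
          cases pvSplit x t <;> simp [List.modifyHead]
        rw [this]
        simp [pvSplit]
      · have hpre : List.isPrefixOf [c] (x :: t) = false := by
          simp [List.isPrefixOf]
          exact fun h' => absurd h'.symm hx
        rw [PySem.Chars.splitOn.go]
        simp only [hpre, Bool.false_eq_true, if_false]
        rw [ih fuel (x :: cur) acc hf]
        have h1 : pvSplit c (x :: t) = (pvSplit c t).modifyHead (x :: ·) := by
          simp [pvSplit, hx]
        rw [h1, pvModifyHead_modifyHead]
        congr 2
        funext y
        simp

theorem pvSplitOn_single (c : Char) (l : List Char) :
    PySem.Chars.splitOn l [c] = pvSplit c l := by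
  unfold PySem.Chars.splitOn
  rw [pvSplitOn_go_eq c l (l.length + 1) [] [] (by omega)]
  have := pvSplit_ne_nil c l
  cases hs : pvSplit c l with
  | nil => exact absurd hs this
  | cons a t => simp [List.modifyHead]

/-- `Chars.replace.go` with single-character old/new is `List.map`. -/
theorem pvReplace_go_eq (c d : Char) :
    ∀ (l : List Char) (fuel : Nat) (acc : List Char),
      l.length ≤ fuel →
      PySem.Chars.replace.go [c] [d] fuel l acc
        = acc.reverse ++ l.map (fun x => if x = c then d else x) := by
  intro l
  induction l with
  | nil =>
    intro fuel acc _
    cases fuel <;> simp [PySem.Chars.replace.go]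
  | cons x t ih =>
    intro fuel acc h
    match fuel, h with
    | fuel + 1, h =>
      have hf : t.length ≤ fuel := by simpa using h
      by_cases hx : x = c
      · subst hx
        have hpre : List.isPrefixOf [x] (x :: t) = true := by simp [List.isPrefixOf]
        rw [PySem.Chars.replace.go]
        simp only [hpre, List.drop_succ_cons, List.drop_zero, List.length_singleton]
        rw [ih fuel ([d].reverse ++ acc) hf]
        simp
      · have hpre : List.isPrefixOf [c] (x :: t) = false := by
          simp [List.isPrefixOf]
          exact fun h' => absurd h'.symm hx
        rw [PySem.Chars.replace.go]
        simp only [hpre, Bool.false_eq_true, if_false]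
        rw [ih fuel (x :: acc) hf]
        simp [hx]

theorem pvReplace_single (c d : Char) (l : List Char) :
    PySem.Chars.replace l [c] [d] = l.map (fun x => if x = c then d else x) := by
  unfold PySem.Chars.replace
  simp only [List.isEmpty_cons, Bool.false_eq_true, if_false]
  exact pvReplace_go_eq c d l l.length [] (le_refl _)

/-- The heart: splitting each newline-chunk on space and flattening equals
    one split on space after mapping newline to space. -/
theorem pvMain (c d : Char) (l : List Char) :
    ((pvSplit c l).map (pvSplit d)).flatten
      = pvSplit d (l.map (fun x => if x = c then d else x)) := by
  induction l with
  | nil => simp [pvSplit]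
  | cons x t ih =>
    by_cases hx : x = c
    · subst hx
      simp only [pvSplit, List.map]
      simp [pvSplit, ih]
    · have h1 : pvSplit c (x :: t) = (pvSplit c t).modifyHead (x :: ·) := by
        simp [pvSplit, hx]
      have hfx : (if x = c then d else x) = x := by simp [hx]
      cases hs : pvSplit c t with
      | nil => exact absurd hs (pvSplit_ne_nil c t)
      | cons l0 ls =>
        have ih2 : pvSplit d l0 ++ (ls.map (pvSplit d)).flatten
            = pvSplit d (t.map (fun x => if x = c then d else x)) := by
          have := ih; rw [hs] at this; simpa using this
        rw [h1, hs]
        simp only [List.modifyHead, List.map_cons, List.flatten_cons, List.map_cons] at *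
        by_cases hd : x = d
        · subst hd
          have h2 : pvSplit x (x :: l0) = [] :: pvSplit x l0 := by simp [pvSplit]
          rw [h2]
          simp only [List.cons_append, hfx]
          have h3 : pvSplit x (x :: t.map (fun y => if y = c then x else y))
              = [] :: pvSplit x (t.map (fun y => if y = c then x else y)) := by
            simp [pvSplit]
          rw [h3, ← ih2]
        · have h2 : pvSplit d (x :: l0) = (pvSplit d l0).modifyHead (x :: ·) := by
            simp [pvSplit, hd]
          rw [h2, ← pvModifyHead_append _ _ _ (pvSplit_ne_nil d l0), ih2]
          simp only [hfx]
          have h3 : pvSplit d (x :: t.map (fun y => if y = c then d else y))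
              = (pvSplit d (t.map (fun y => if y = c then d else y))).modifyHead (x :: ·) := by
            simp [pvSplit, hd]
          rw [h3]

theorem pvFoldl_concat {a b : Type} (g : a -> b) (l : List a) :
    forall acc : List b, l.foldl (fun acc t => acc ++ [g t]) acc = acc ++ l.map g := by
  induction l with
  | nil => intro acc; simp
  | cons x t ih => intro acc; simp [List.foldl, ih]

theorem pvSplitStr (sep : Char) (sepS : String) (hs : sepS.toList = [sep]) (s : String) :
    (PySem.Str.split? s sepS).getD []
      = (pvSplit sep s.toList).map String.ofList := by
  unfold PySem.Str.split?
  rw [hs, PySem.Chars.split?.eq_1]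
  simp [pvSplitOn_single]

-- ===== VERDICT (by name: the statement is the Claim_ definition above) =====
theorem readlyrics_spec : Claim_equal_readlyrics := by
  intro lyfile _
  unfold Spec_readlyrics readlyrics readlyrics_alt
  simp only []
  rw [pvSplitStr '\n' "\n" rfl lyfile, pvFoldl_concat]
  have hB : PySem.Str.replace lyfile "\n" " "
      = String.ofList (lyfile.toList.map (fun x => if x = '\n' then ' ' else x)) := by
    unfold PySem.Str.replace
    rw [show ("\n" : String).toList = ['\n'] from rfl, show (" " : String).toList = [' '] from rfl,
        pvReplace_single]
  rw [hB, pvSplitStr ' ' " " rfl _]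
  rw [String.toList_ofList, ← pvMain '\n' ' ']
  simp only [List.map_map, List.nil_append]
  rw [show (fun tline => (PySem.Str.split? tline " ").getD []) ∘ String.ofList
      = fun cs => (pvSplit ' ' cs).map String.ofList from funext fun cs => by
        simp [Function.comp, pvSplitStr ' ' " " rfl (String.ofList cs)]]
  induction pvSplit '\n' lyfile.toList with
  | nil => simp
  | cons a t ih => simp_all [List.flatMap]
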